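-- pv_equiv track=rewrite | github.com/kkvns/Rule_Engine_F | ast_logic.py | find_main_operator
-- ===== SOURCE A (Python) =====
-- def find_main_operator(rule_string):
--     paren_count = 0
--     for i, char in enumerate(rule_string):
--         if char == '(':
--             paren_count += 1
--         elif char == ')':
--             paren_count -= 1
--         elif paren_count == 0:
--             # Check if we have AND or OR outside of parentheses
--             if rule_string[i:i + 3] == 'AND' or rule_string[i:i + 2] == 'OR':
--                 return i
--     return -1
-- ===== SOURCE B (Python) =====
-- def find_main_operator(rule_string):
--     # Index all candidate operator start positions first, then return the first
--     # one whose prefix has balanced parentheses (top level).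
--     candidates = [i for i in range(len(rule_string))
--                   if rule_string[i:i + 3] == 'AND' or rule_string[i:i + 2] == 'OR']
--     for i in candidates:
--         prefix = rule_string[:i]
--         if prefix.count('(') == prefix.count(')'):
--             return i
--     return -1
-- ===== Notes on version B (the rewrite author's own statement) =====
-- stated objective: alternative
-- what changed: Replaces A's single scan with a running parenthesis-depth counter by a two-phase approach: first index every 'AND'/'OR' start position, then return the first candidate whose prefix has equal '(' and ')' counts.
import Mathlib
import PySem

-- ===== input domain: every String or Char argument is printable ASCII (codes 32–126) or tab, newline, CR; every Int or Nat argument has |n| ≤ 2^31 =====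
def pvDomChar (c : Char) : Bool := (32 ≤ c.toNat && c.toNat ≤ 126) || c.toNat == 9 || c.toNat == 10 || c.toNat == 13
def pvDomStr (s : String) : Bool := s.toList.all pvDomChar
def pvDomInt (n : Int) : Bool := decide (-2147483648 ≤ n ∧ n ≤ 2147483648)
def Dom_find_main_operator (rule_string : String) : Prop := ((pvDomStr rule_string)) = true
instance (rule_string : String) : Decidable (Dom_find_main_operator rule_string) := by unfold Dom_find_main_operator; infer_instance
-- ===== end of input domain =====

-- B replaces A's running parenthesis-depth scan by candidate indexing: list all
-- 'AND'/'OR' start positions first, then return the first whose prefix has equal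
-- '(' and ')' counts (objective: alternative algorithm, similar cost).

-- ===== PORT A =====
-- shared candidate test: both Pythons contain the literal expression
-- rule_string[i:i+3] == 'AND' or rule_string[i:i+2] == 'OR'
def pvIsCand (s : List Char) (i : Nat) : Bool :=
  PySem.List.slice s (some (i : Int)) (some ((i + 3 : Nat) : Int)) == "AND".toList ||
  PySem.List.slice s (some (i : Int)) (some ((i + 2 : Nat) : Int)) == "OR".toList

-- the 'for i, char in enumerate(...)' loop with early return, index i carried explicitly
def pvLoopA (s : List Char) : List Char → Nat → Int → Int
  | [], _, _ => -1
  | c :: rest, i, cnt =>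
    if c = '(' then pvLoopA s rest (i + 1) (cnt + 1)
    else if c = ')' then pvLoopA s rest (i + 1) (cnt - 1)
    else if cnt = 0 then
      (if pvIsCand s i then (i : Int) else pvLoopA s rest (i + 1) cnt)
    else pvLoopA s rest (i + 1) cnt

def find_main_operator (rule_string : String) : Int :=
  pvLoopA rule_string.toList rule_string.toList 0 0

-- ===== PORT B =====
-- 'for i in candidates: if prefix.count("(") == prefix.count(")"): return i'
def pvPick (s : List Char) : List Nat → Int
  | [] => -1
  | i :: rest =>
    let pfx := PySem.List.slice s none (some (i : Int))
    if pfx.count '(' = pfx.count ')' then (i : Int) else pvPick s rest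

def find_main_operator_alt (rule_string : String) : Int :=
  let s := rule_string.toList
  pvPick s ((List.range s.length).filter (pvIsCand s))

-- ===== PRECONDITION & SPEC =====
def Spec_find_main_operator (rule_string : String) (out : Int) : Prop := out = find_main_operator_alt rule_string
instance (rule_string : String) (out : Int) : Decidable (Spec_find_main_operator rule_string out) := by unfold Spec_find_main_operator; infer_instance

-- ===== CLAIM (what is proved, stated in full; the proofs are below) =====
def Claim_equal_find_main_operator : Prop := ∀ (rule_string : String), Dom_find_main_operator rule_string → Spec_find_main_operator rule_string (find_main_operator rule_string)

-- ===== LEMMAS AND PROOFS =====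

-- A's running counter equals '(' count minus ')' count of the prefix
def pvBal (s : List Char) (i : Nat) : Int :=
  ((s.take i).count '(' : Int) - ((s.take i).count ')' : Int)

lemma pvTake_succ_eq (s : List Char) (i : Nat) (h : i < s.length) :
    s.take (i + 1) = s.take i ++ [s[i]] := by
  rw [List.take_add_one, List.getElem?_eq_getElem h]; rfl

lemma pvBal_succ (s : List Char) (i : Nat) (h : i < s.length) :
    pvBal s (i + 1) =
      pvBal s i + (if s[i] = '(' then 1 else if s[i] = ')' then -1 else 0) := by
  unfold pvBal
  rw [pvTake_succ_eq s i h, List.count_append, List.count_append]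
  by_cases h1 : s[i] = '('
  · rw [if_pos h1, h1]; norm_num [List.count_singleton]; ring
  · by_cases h2 : s[i] = ')'
    · rw [if_neg h1, if_pos h2, h2]; norm_num [List.count_singleton]; ring
    · rw [if_neg h1, if_neg h2]; norm_num [List.count_singleton, h1, h2]

lemma pvIsCand_slice (s : List Char) (i : Nat) :
    pvIsCand s i = ((s.drop i).take 3 == "AND".toList || (s.drop i).take 2 == "OR".toList) := by
  have h3 : i + 3 - i = 3 := by omega
  have h2 : i + 2 - i = 2 := by omega
  simp only [pvIsCand]
  rw [PySem.List.slice_natCast, PySem.List.slice_natCast, h3, h2]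

-- a candidate position starts with 'A' or 'O'
lemma pvCand_head (s : List Char) (i : Nat) (h : i < s.length)
    (hc : pvIsCand s i = true) : s[i] = 'A' ∨ s[i] = 'O' := by
  rw [pvIsCand_slice] at hc
  rcases Bool.or_eq_true_iff.mp hc with h3 | h2
  · left
    have h' : (List.take 3 (s.drop i)).headI = 'A' := by rw [eq_of_beq h3]; rfl
    rw [List.drop_eq_getElem_cons h, show (3:Nat) = 2+1 from rfl, List.take_succ_cons] at h'
    simpa only [List.headI_cons] using h'
  · right
    have h' : (List.take 2 (s.drop i)).headI = 'O' := by rw [eq_of_beq h2]; rfl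
    rw [List.drop_eq_getElem_cons h, show (2:Nat) = 1+1 from rfl, List.take_succ_cons] at h'
    simpa only [List.headI_cons] using h' 

lemma pvPick_cons (s : List Char) (i : Nat) (rest : List Nat) :
    pvPick s (i :: rest) =
      if (s.take i).count '(' = (s.take i).count ')' then (i : Int) else pvPick s rest := by
  simp only [pvPick, PySem.List.slice_to_natCast]

lemma pvMain (s : List Char) :
    ∀ n i, s.length - i ≤ n →
      pvLoopA s (s.drop i) i (pvBal s i) =
        pvPick s (((List.range s.length).drop i).filter (pvIsCand s)) := by
  intro n
  induction n with
  | zero =>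
    intro i hi
    have h1 : s.length ≤ i := by omega
    rw [List.drop_eq_nil_of_le h1, List.drop_eq_nil_of_le (by simpa using h1)]
    simp [pvLoopA, pvPick]
  | succ n ih =>
    intro i hi
    by_cases hlt : i < s.length
    · have hd : s.drop i = s[i] :: s.drop (i + 1) := List.drop_eq_getElem_cons hlt
      have hr : (List.range s.length).drop i = i :: (List.range s.length).drop (i + 1) := by
        have := List.drop_eq_getElem_cons (l := List.range s.length) (by simpa using hlt)
        simpa using this
      have ih' := ih (i + 1) (by omega)
      have hbal := pvBal_succ s i hlt
      rw [hd, hr]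
      simp only [pvLoopA, List.filter_cons]
      by_cases h1 : s[i] = '('
      · have hnc : pvIsCand s i = false := by
          cases hE : pvIsCand s i
          · rfl
          · rcases pvCand_head s i hlt hE with h' | h' <;>
              (rw [h1] at h'; exact absurd h' (by decide))
        have hb : pvBal s i + 1 = pvBal s (i + 1) := by
          rw [hbal, if_pos h1]
        rw [if_pos h1, hnc, hb]
        simpa using ih'
      · by_cases h2 : s[i] = ')'
        · have hnc : pvIsCand s i = false := by
            cases hE : pvIsCand s i
            · rfl
            · rcases pvCand_head s i hlt hE with h' | h' <;>
                (rw [h2] at h'; exact absurd h' (by decide))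
          have hb : pvBal s i - 1 = pvBal s (i + 1) := by
            rw [hbal, if_neg h1, if_pos h2]; ring
          rw [if_neg h1, if_pos h2, hnc, hb]
          simpa using ih'
        · have hb : pvBal s (i + 1) = pvBal s i := by
            rw [hbal, if_neg h1, if_neg h2]; ring
          have hcnt : pvBal s i = 0 ↔ (s.take i).count '(' = (s.take i).count ')' := by
            unfold pvBal; omega
          rw [if_neg h1, if_neg h2]
          cases hE : pvIsCand s i
          · simp only [Bool.false_eq_true, if_false]
            by_cases hz : pvBal s i = 0
            · rw [if_pos hz, ← hb]; exact ih'
            · rw [if_neg hz, ← hb]; exact ih'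
          · simp only [if_true]
            rw [pvPick_cons]
            by_cases hz : pvBal s i = 0
            · rw [if_pos hz, if_pos (hcnt.mp hz)]
            · rw [if_neg hz, if_neg (fun h => hz (hcnt.mpr h)), ← hb]
              exact ih'
    · have h1 : s.length ≤ i := by omega
      rw [List.drop_eq_nil_of_le h1, List.drop_eq_nil_of_le (by simpa using h1)]
      simp [pvLoopA, pvPick]

-- ===== VERDICT (by name: the statement is the Claim_ definition above) =====
theorem find_main_operator_spec : Claim_equal_find_main_operator := by
  intro rs _
  unfold Spec_find_main_operator find_main_operator find_main_operator_alt
  have h := pvMain rs.toList rs.toList.length 0 (by omega)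
  simpa [pvBal] using h
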